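-- pv_equiv track=rewrite | github.com/oks-citadel/UGC-Content-Creation-SaaS-Platform | ai/performance-predictor/src/services/ml_models.py | _detect_call_to_action
-- ===== SOURCE A (Python) =====
-- def _detect_call_to_action(text: str) -> bool:
--     """Detect presence of call-to-action."""
--     cta_phrases = [
--         "follow", "like", "comment", "share", "subscribe",
--         "click", "link in bio", "tag", "try", "shop",
--         "learn more", "dm me", "check out"
--     ]
--
--     text_lower = text.lower()
--     return any(phrase in text_lower for phrase in cta_phrases)
-- ===== SOURCE B (Python) =====
-- def _detect_call_to_action(text: str) -> bool:
--     """Detect presence of call-to-action."""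
--     cta_phrases = [
--         "follow", "like", "comment", "share", "subscribe",
--         "click", "link in bio", "tag", "try", "shop",
--         "learn more", "dm me", "check out"
--     ]
--
--     # Single left-to-right pass maintaining the set of partial matches in
--     # progress (the remaining suffix of each phrase currently being matched),
--     # instead of one full substring scan per phrase.
--     active = []  # remaining tails of phrases whose start has been seen
--     for ch in text.lower():
--         nxt = []
--         for tail in active + cta_phrases:
--             if tail[0] == ch:
--                 if len(tail) == 1:
--                     return True
--                 nxt.append(tail[1:])
--         active = nxt
--     return False
-- ===== Notes on version B (the rewrite author's own statement) =====
-- stated objective: alternative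
-- what changed: Instead of running 13 independent full per-phrase substring scans, B makes one left-to-right pass over the lowered text maintaining an accumulator of in-progress partial matches (the remaining tail of every phrase whose beginning matches a suffix of the characters read so far), completing the moment a tail is consumed.
import Mathlib
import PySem

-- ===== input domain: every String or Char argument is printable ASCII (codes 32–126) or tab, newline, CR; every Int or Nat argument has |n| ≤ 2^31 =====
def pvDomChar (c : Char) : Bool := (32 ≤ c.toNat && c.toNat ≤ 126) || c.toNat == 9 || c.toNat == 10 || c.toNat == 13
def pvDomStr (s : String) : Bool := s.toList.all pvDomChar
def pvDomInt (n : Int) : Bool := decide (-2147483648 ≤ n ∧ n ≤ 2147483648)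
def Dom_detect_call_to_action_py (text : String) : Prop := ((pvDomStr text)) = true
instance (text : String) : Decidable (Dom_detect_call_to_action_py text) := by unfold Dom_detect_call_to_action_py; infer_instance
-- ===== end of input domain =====

-- B replaces A's 13 independent full substring scans by one left-to-right pass over the
-- lowered text that maintains an accumulator of in-progress partial matches (the
-- remaining tail of each phrase whose beginning has been seen); same return value.

-- ===== PORT A =====
def ctaPhrases : List String :=
  ["follow", "like", "comment", "share", "subscribe",
   "click", "link in bio", "tag", "try", "shop",
   "learn more", "dm me", "check out"]

-- any(phrase in text_lower for phrase in cta_phrases)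
def detect_call_to_action_py (text : String) : Bool :=
  let text_lower := PySem.Str.lower text
  ctaPhrases.any (fun phrase => PySem.Str.isIn phrase text_lower)

-- ===== PORT B =====
def ctaPhraseLists : List (List Char) := ctaPhrases.map String.toList

-- inner loop body: for tail in active + cta_phrases: if tail[0]==ch: (len==1 → return
-- True, encoded as none) else collect tail[1:]; 'some nxt' = loop finished, new actives
def pvAdvance (c : Char) : List (List Char) → Option (List (List Char))
  | [] => some []
  | tail :: rest =>
    match tail with
    | [] => pvAdvance c rest  -- unreachable: every tail is nonempty
    | d :: ds =>
      if d = c then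
        if ds = [] then none
        else (pvAdvance c rest).map (ds :: ·)
      else pvAdvance c rest

-- outer loop: for ch in text.lower(): …; return False after the loop
def pvScan : List Char → List (List Char) → Bool
  | [], _ => false
  | c :: cs, active =>
    match pvAdvance c (active ++ ctaPhraseLists) with
    | none => true
    | some nxt => pvScan cs nxt

def detect_call_to_action_py_alt (text : String) : Bool :=
  pvScan (PySem.Chars.lower text.toList) []

-- ===== PRECONDITION & SPEC =====
def Spec_detect_call_to_action_py (text : String) (out : Bool) : Prop := out = detect_call_to_action_py_alt text
instance (text : String) (out : Bool) : Decidable (Spec_detect_call_to_action_py text out) := by unfold Spec_detect_call_to_action_py; infer_instance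

-- ===== CLAIM (what is proved, stated in full; the proofs are below) =====
def Claim_equal_detect_call_to_action_py : Prop := ∀ (text : String), Dom_detect_call_to_action_py text → Spec_detect_call_to_action_py text (detect_call_to_action_py text)

-- ===== LEMMAS AND PROOFS =====

theorem ctaPhraseLists_ne_nil : ∀ p ∈ ctaPhraseLists, p ≠ [] := by decide

-- the inner loop signals completion (Python's 'return True') iff some candidate is [c]
theorem pvAdvance_eq_none_iff (c : Char) (cands : List (List Char)) :
    pvAdvance c cands = none ↔ [c] ∈ cands := by
  induction cands with
  | nil => simp [pvAdvance]
  | cons t rest ih =>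
    match t with
    | [] => simp [pvAdvance, ih]
    | d :: ds =>
      by_cases hd : d = c
      · by_cases hds : ds = []
        · subst hd; subst hds; simp [pvAdvance]
        · have hm : ([c] ∈ (d :: ds) :: rest) ↔ ([c] ∈ rest) := by
            rw [List.mem_cons]
            refine ⟨?_, Or.inr⟩
            rintro (h | h)
            · injection h with _ h2; exact absurd h2.symm hds
            · exact h
          rw [hm]
          simp [pvAdvance, hd, hds, ih, Option.map_eq_none_iff]
      · have hm : ([c] ∈ (d :: ds) :: rest) ↔ ([c] ∈ rest) := by
          rw [List.mem_cons]
          refine ⟨?_, Or.inr⟩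
          rintro (h | h)
          · injection h with h1 _; exact absurd h1.symm hd
          · exact h
        rw [hm]
        simp [pvAdvance, hd, ih]

def pvStepFn (c : Char) : List Char → Option (List Char)
  | [] => none
  | d :: ds => if d = c then (if ds = [] then none else some ds) else none

-- when the inner loop finishes, the new actives are exactly the advanced tails
theorem pvAdvance_eq_some (c : Char) (cands nxt : List (List Char))
    (h : pvAdvance c cands = some nxt) : nxt = cands.filterMap (pvStepFn c) := by
  induction cands generalizing nxt with
  | nil => simp [pvAdvance] at h; simp [h]
  | cons t rest ih =>
    match t with
    | [] =>
      simp only [pvAdvance] at h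
      simpa [List.filterMap_cons, pvStepFn] using ih nxt h
    | d :: ds =>
      by_cases hd : d = c
      · by_cases hds : ds = []
        · simp [pvAdvance, hd, hds] at h
        · simp only [pvAdvance, if_pos hd, if_neg hds] at h
          obtain ⟨nxt', hn', rfl⟩ := Option.map_eq_some_iff.mp h
          simp [pvStepFn, hd, hds, ih nxt' hn']
      · simp only [pvAdvance, if_neg hd] at h
        simpa [List.filterMap_cons, pvStepFn, hd] using ih nxt h

theorem pvStepFn_eq_some_iff (c : Char) (s t : List Char) :
    pvStepFn c s = some t ↔ s = c :: t ∧ t ≠ [] := by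
  match s with
  | [] => simp [pvStepFn]
  | d :: ds =>
    by_cases hd : d = c
    · subst hd
      by_cases hds : ds = []
      · subst hds
        constructor
        · intro h; simp [pvStepFn] at h
        · rintro ⟨h, ht⟩; injection h with _ h2; exact absurd h2.symm ht
      · constructor
        · intro h
          simp only [pvStepFn, if_neg hds] at h
          injection h with h2
          exact ⟨by rw [h2], h2 ▸ hds⟩
        · rintro ⟨h, ht⟩
          injection h with _ h2
          subst h2
          simp [pvStepFn, hds]
    · constructor
      · intro h; simp [pvStepFn, hd] at h
      · rintro ⟨h, _⟩
        injection h with h1 _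
        exact absurd h1 hd

-- loop invariant: the scan succeeds iff some active tail is a prefix of the remaining
-- text, or some phrase occurs somewhere in the remaining text
theorem pvScan_iff (cs : List Char) (active : List (List Char))
    (hne : ∀ t ∈ active, t ≠ []) :
    pvScan cs active = true ↔
      (∃ t ∈ active, t <+: cs) ∨ (∃ p ∈ ctaPhraseLists, p <:+: cs) := by
  induction cs generalizing active with
  | nil =>
    simp only [pvScan]
    constructor
    · intro h; cases h
    · rintro (⟨t, ht, hpre⟩ | ⟨p, hp, hinf⟩)
      · exact absurd (List.prefix_nil.mp hpre) (hne t ht)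
      · exact absurd (List.infix_nil.mp hinf) (ctaPhraseLists_ne_nil p hp)
  | cons c cs' ih =>
    simp only [pvScan]
    cases hadv : pvAdvance c (active ++ ctaPhraseLists) with
    | none =>
      simp only [true_iff]
      have hm := (pvAdvance_eq_none_iff c _).mp hadv
      rcases List.mem_append.mp hm with hA | hP
      · exact Or.inl ⟨[c], hA, by simp⟩
      · exact Or.inr ⟨[c], hP, ((by simp : [c] <+: c :: cs')).isInfix⟩
    | some nxt =>
      have hnxt : nxt = (active ++ ctaPhraseLists).filterMap (pvStepFn c) :=
        pvAdvance_eq_some c _ nxt hadv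
      have hmem : ∀ t, t ∈ nxt ↔ (c :: t ∈ active ++ ctaPhraseLists ∧ t ≠ []) := by
        intro t
        rw [hnxt, List.mem_filterMap]
        constructor
        · rintro ⟨s, hs, hf⟩
          obtain ⟨rfl, hne'⟩ := (pvStepFn_eq_some_iff c s t).mp hf
          exact ⟨hs, hne'⟩
        · rintro ⟨hs, hne'⟩
          exact ⟨c :: t, hs, (pvStepFn_eq_some_iff c _ t).mpr ⟨rfl, hne'⟩⟩
      have hno : [c] ∉ active ++ ctaPhraseLists := by
        intro h; rw [← pvAdvance_eq_none_iff c] at h; rw [h] at hadv; cases hadv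
      rw [ih nxt (fun t ht => ((hmem t).mp ht).2)]
      constructor
      · rintro (⟨t, ht, hpre⟩ | ⟨p, hp, hinf⟩)
        · obtain ⟨hct, _⟩ := (hmem t).mp ht
          rcases List.mem_append.mp hct with hA | hP
          · exact Or.inl ⟨c :: t, hA, List.cons_prefix_cons.mpr ⟨rfl, hpre⟩⟩
          · exact Or.inr ⟨c :: t, hP, (List.cons_prefix_cons.mpr ⟨rfl, hpre⟩).isInfix⟩
        · exact Or.inr ⟨p, hp, hinf.trans (List.suffix_cons c cs').isInfix⟩
      · -- any prefix/infix match of c :: cs' either completes now (impossible here) or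
        -- advances into nxt / stays an infix of cs'
        have key : ∀ s, s ∈ active ++ ctaPhraseLists → s <+: c :: cs' → s ≠ [] →
            ∃ t ∈ nxt, t <+: cs' := by
          intro s hs hpre hsne
          match s, hsne with
          | d :: ds, _ =>
            obtain ⟨hd, hds⟩ : d = c ∧ ds <+: cs' := by
              obtain ⟨u, hu⟩ := hpre
              injection hu with h1 h2
              exact ⟨h1, ⟨u, h2⟩⟩
            subst hd
            have hdsne : ds ≠ [] := by
              rintro rfl; exact hno hs
            exact ⟨ds, (hmem ds).mpr ⟨hs, hdsne⟩, hds⟩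
        rintro (⟨t, ht, hpre⟩ | ⟨p, hp, hinf⟩)
        · exact Or.inl (key t (List.mem_append.mpr (Or.inl ht)) hpre (hne t ht))
        · rcases List.infix_cons_iff.mp hinf with hpre | hinf'
          · exact Or.inl (key p (List.mem_append.mpr (Or.inr hp)) hpre
              (ctaPhraseLists_ne_nil p hp))
          · exact Or.inr ⟨p, hp, hinf'⟩

theorem detect_eq (text : String) :
    detect_call_to_action_py text = detect_call_to_action_py_alt text := by
  unfold detect_call_to_action_py detect_call_to_action_py_alt
  rw [Bool.eq_iff_iff,
      pvScan_iff (PySem.Chars.lower text.toList) [] (by simp)]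
  simp only [List.any_eq_true, PySem.Str.isIn_iff_infix, PySem.Str.toList_lower]
  constructor
  · rintro ⟨p, hp, hin⟩
    exact Or.inr ⟨p.toList, List.mem_map.mpr ⟨p, hp, rfl⟩, hin⟩
  · rintro (⟨t, ht, _⟩ | ⟨q, hq, hin⟩)
    · cases ht
    · obtain ⟨p, hp, rfl⟩ := List.mem_map.mp hq
      exact ⟨p, hp, hin⟩

-- ===== VERDICT (by name: the statement is the Claim_ definition above) =====
theorem detect_call_to_action_py_spec : Claim_equal_detect_call_to_action_py := by
  intro text _
  unfold Spec_detect_call_to_action_py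
  exact detect_eq text
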